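-- pv_equiv track=rewrite | github.com/kkobug/algorithm_study | programmers/기출/kakao2022/파괴되지 않은 건물.py | solution
-- ===== SOURCE A (Python) =====
-- def solution(board, skill):
--     answer = 0
--     N, M = len(board), len(board[0])
--     total_skill = [[0]*M for _ in range(N)]
--     for type, r1, c1, r2, c2, degree in skill:
--         if type == 1:
--             degree *= -1
--
--         total_skill[r1][c1] += degree
--         A = c2+1 < M
--         B = r2+1 < N
--         if A:
--             total_skill[r1][c2+1] -= degree
--         if B:
--             total_skill[r2+1][c1] -= degree
--         if A & B:
--             total_skill[r2+1][c2+1] += degree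
--
--     for i in range(N):
--         for j in range(1, M):
--             total_skill[i][j] += total_skill[i][j-1]
--
--     for i in range(1, N):
--         for j in range(M):
--             total_skill[i][j] += total_skill[i-1][j]
--
--     for i in range(N):
--         for j in range(M):
--             board[i][j] += total_skill[i][j]
--             if 0 < board[i][j]:
--                 answer += 1
--
--     return answer
-- ===== SOURCE B (Python) =====
-- def solution(board, skill):
--     n, m = len(board), len(board[0])
--     for t, r1, c1, r2, c2, deg in skill:
--         d = -deg if t == 1 else deg
--         for i in range(r1, r2 + 1):
--             for j in range(c1, c2 + 1):
--                 board[i][j] += d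
--     answer = 0
--     for i in range(n):
--         for j in range(m):
--             if board[i][j] > 0:
--                 answer += 1
--     return answer
-- ===== Notes on version B (the rewrite author's own statement) =====
-- stated objective: simpler
-- what changed: B drops the 2D difference array and its two prefix-sum passes entirely: it adds each skill's signed degree directly into the inclusive rectangle of the board and then counts cells > 0 in one pass.
-- outside the precondition, e.g. on solution([[1, 1, 1]], [[2, 0, 2, 0, 0, 5]]): A returns 2, B returns 3; on solution([[1, 1], [1, 1]], [[2, -1, 0, -1, 1, 5]]): A returns 2, B returns 4
import Mathlib
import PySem

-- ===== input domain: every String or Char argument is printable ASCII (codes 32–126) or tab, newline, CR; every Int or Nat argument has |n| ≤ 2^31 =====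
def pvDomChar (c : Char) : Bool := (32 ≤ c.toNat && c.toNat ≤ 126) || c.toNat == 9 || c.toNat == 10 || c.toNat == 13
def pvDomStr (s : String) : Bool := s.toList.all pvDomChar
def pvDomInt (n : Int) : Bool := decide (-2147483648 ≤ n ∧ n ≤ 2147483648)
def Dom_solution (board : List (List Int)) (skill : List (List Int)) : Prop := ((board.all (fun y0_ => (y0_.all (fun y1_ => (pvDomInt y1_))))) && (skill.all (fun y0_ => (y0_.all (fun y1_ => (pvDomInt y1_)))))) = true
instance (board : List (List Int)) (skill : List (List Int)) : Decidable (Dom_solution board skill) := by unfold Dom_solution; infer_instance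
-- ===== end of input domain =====

-- B replaces A's 2D difference array + two prefix-sum passes by adding each skill's signed
-- degree directly into its rectangle and counting positive cells in one pass (objective: simpler).
-- Both Pythons also mutate `board` in place identically on Pre_; the theorems are about the return value.

-- ===== PORT A =====
-- `x[i][j] += d` on a list-of-lists (functional update; indices are in range on Pre_, so the
-- Nat indices used below coincide with Python's indexing there)
def pvUpd2 (g : List (List Int)) (i j : Nat) (d : Int) : List (List Int) :=
  g.set i ((g.getD i []).set j ((g.getD i []).getD j 0 + d))

-- the body of A's skill loop (the four difference-array markers)
def pvMark (N M : Int) (g : List (List Int)) (s : List Int) : List (List Int) :=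
  match s with
  | [t, r1, c1, r2, c2, deg0] =>
    let deg := if t = 1 then -deg0 else deg0
    let g1 := pvUpd2 g r1.toNat c1.toNat deg
    let condA := c2 + 1 < M
    let condB := r2 + 1 < N
    let g2 := if condA then pvUpd2 g1 r1.toNat (c2 + 1).toNat (-deg) else g1
    let g3 := if condB then pvUpd2 g2 (r2 + 1).toNat c1.toNat (-deg) else g2
    if condA ∧ condB then pvUpd2 g3 (r2 + 1).toNat (c2 + 1).toNat deg else g3
  | _ => g  -- a skill row that is not a 6-tuple raises ValueError in Python; excluded by Pre_

-- total_skill[i][j] += total_skill[i][j-1]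
def pvRowStep (g : List (List Int)) (i j : Int) : List (List Int) :=
  pvUpd2 g i.toNat j.toNat ((g.getD i.toNat []).getD (j.toNat - 1) 0)

-- for i in range(N): for j in range(1, M): ...
def pvRowPass (N M : Int) (g : List (List Int)) : List (List Int) :=
  (PySem.List.pyRange 0 N 1).foldl (fun g i =>
    (PySem.List.pyRange 1 M 1).foldl (fun g j => pvRowStep g i j) g) g

-- total_skill[i][j] += total_skill[i-1][j]
def pvColStep (g : List (List Int)) (i j : Int) : List (List Int) :=
  pvUpd2 g i.toNat j.toNat ((g.getD (i.toNat - 1) []).getD j.toNat 0)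

-- for i in range(1, N): for j in range(M): ...
def pvColPass (N M : Int) (g : List (List Int)) : List (List Int) :=
  (PySem.List.pyRange 1 N 1).foldl (fun g i =>
    (PySem.List.pyRange 0 M 1).foldl (fun g j => pvColStep g i j) g) g

-- The final Python loop writes board[i][j] += total_skill[i][j] and then tests the freshly
-- written cell; that value is board[i][j] + total_skill[i][j], which is what the port tests
-- (each cell is written once, just before its single read, so the count is unaffected).
def solution (board : List (List Int)) (skill : List (List Int)) : Int :=
  let N : Int := board.length
  let M : Int := (board.headD []).length   -- len(board[0]); Pre_ excludes the empty board (IndexError)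
  let t0 : List (List Int) := List.replicate board.length (List.replicate (board.headD []).length 0)
  let t1 := skill.foldl (pvMark N M) t0
  let t2 := pvColPass N M (pvRowPass N M t1)
  (PySem.List.pyRange 0 N 1).foldl (fun a i =>
    (PySem.List.pyRange 0 M 1).foldl (fun a j =>
      a + (if 0 < (board.getD i.toNat []).getD j.toNat 0 + (t2.getD i.toNat []).getD j.toNat 0
           then 1 else 0)) a) 0

-- ===== PORT B =====
-- the body of B's skill loop: add d over the inclusive rectangle
def pvApply (bd : List (List Int)) (s : List Int) : List (List Int) :=
  match s with
  | [t, r1, c1, r2, c2, deg] =>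
    let d := if t = 1 then -deg else deg
    (PySem.List.pyRange r1 (r2 + 1) 1).foldl (fun b i =>
      (PySem.List.pyRange c1 (c2 + 1) 1).foldl (fun b j => pvUpd2 b i.toNat j.toNat d) b) bd
  | _ => bd  -- malformed skill row: excluded by Pre_

def solution_alt (board : List (List Int)) (skill : List (List Int)) : Int :=
  let n : Int := board.length
  let m : Int := (board.headD []).length
  let bd := skill.foldl pvApply board
  (PySem.List.pyRange 0 n 1).foldl (fun a i =>
    (PySem.List.pyRange 0 m 1).foldl (fun a j =>
      a + (if 0 < (bd.getD i.toNat []).getD j.toNat 0 then 1 else 0)) a) 0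

-- ===== PRECONDITION & SPEC =====
-- a skill row is a 6-tuple whose rectangle lies inside the N×M grid, in normal orientation
def SkillWF (N M : Int) (s : List Int) : Prop :=
  s.length = 6 ∧ 0 ≤ s.getD 1 0 ∧ s.getD 1 0 ≤ s.getD 3 0 ∧ s.getD 3 0 < N ∧
  0 ≤ s.getD 2 0 ∧ s.getD 2 0 ≤ s.getD 4 0 ∧ s.getD 4 0 < M

-- Pre_ excludes: the empty board and rows shorter than row 0 (A raises IndexError there), skill
-- rows of length ≠ 6 (A's tuple unpacking raises ValueError) or with coordinates outside the
-- grid (IndexError, or silent negative-index wraparound), and reversed rectangles (r2 < r1 or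
-- c2 < c1), where A's stray difference-array markers yield accidental values — all outside the
-- problem's stated domain of in-grid, normally oriented skill rectangles.
def Pre_solution (board : List (List Int)) (skill : List (List Int)) : Prop :=
  board ≠ [] ∧ (∀ row ∈ board, (board.headD []).length ≤ row.length) ∧
  ∀ s ∈ skill, SkillWF board.length (board.headD []).length s

instance (board : List (List Int)) (skill : List (List Int)) : Decidable (Pre_solution board skill) := by
  unfold Pre_solution SkillWF; infer_instance

def pvWitness_solution : List (List Int) × List (List Int) := ([[5, 5], [5, 5]], [[1, 0, 0, 1, 1, 4]])

def Spec_solution (board : List (List Int)) (skill : List (List Int)) (out : Int) : Prop := out = solution_alt board skill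
instance (board : List (List Int)) (skill : List (List Int)) (out : Int) : Decidable (Spec_solution board skill out) := by unfold Spec_solution; infer_instance

-- ===== CLAIM (what is proved, stated in full; the proofs are below) =====
def Claim_equal_solution : Prop := ∀ (board : List (List Int)) (skill : List (List Int)), Dom_solution board skill → Pre_solution board skill → Spec_solution board skill (solution board skill)

-- ===== LEMMAS AND PROOFS =====

def gg (g : List (List Int)) (i j : Nat) : Int := (g.getD i []).getD j 0

theorem len_upd2 (g : List (List Int)) (a b : Nat) (d : Int) : (pvUpd2 g a b d).length = g.length := by
  simp [pvUpd2]

theorem getD_set (l : List Int) (i j : Nat) (a : Int) :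
    (l.set i a).getD j 0 = if j = i ∧ i < l.length then a else l.getD j 0 := by
  simp [List.getD, List.getElem?_set]; split_ifs <;> simp_all

theorem getD_set_rows (l : List (List Int)) (i j : Nat) (a : List Int) :
    (l.set i a).getD j [] = if j = i ∧ i < l.length then a else l.getD j [] := by
  simp [List.getD, List.getElem?_set]; split_ifs <;> simp_all

theorem rowlen_upd2 (g : List (List Int)) (a b : Nat) (d : Int) (i : Nat) :
    ((pvUpd2 g a b d).getD i []).length = (g.getD i []).length := by
  simp only [pvUpd2, getD_set_rows]
  split_ifs with h
  · rw [h.1]; simp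
  · rfl

theorem gg_upd2 (g : List (List Int)) (a b : Nat) (d : Int) (i j : Nat) :
    gg (pvUpd2 g a b d) i j =
      gg g i j + (if i = a ∧ j = b ∧ a < g.length ∧ b < (g.getD a []).length then d else 0) := by
  simp only [gg, pvUpd2, getD_set_rows]
  by_cases hi : i = a ∧ a < g.length
  · rw [if_pos hi, hi.1, getD_set]
    by_cases hj : j = b ∧ b < (g.getD a []).length
    · rw [if_pos hj, if_pos ⟨rfl, hj.1, hi.2, hj.2⟩, hj.1]
    · rw [if_neg hj, if_neg (fun hc => hj ⟨hc.2.1, hc.2.2.2⟩), add_zero]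
  · rw [if_neg hi, if_neg (by tauto), add_zero]

def Shape (g : List (List Int)) (n m : Nat) : Prop := g.length = n ∧ ∀ i < n, (g.getD i []).length = m

theorem shape_upd2 {g : List (List Int)} {n m : Nat} (h : Shape g n m) (a b : Nat) (d : Int) :
    Shape (pvUpd2 g a b d) n m :=
  ⟨by rw [len_upd2]; exact h.1, fun i hi => by rw [rowlen_upd2]; exact h.2 i hi⟩

def mcell (N M : Int) (s : List Int) (i j : Int) : Int :=
  let r1 := s.getD 1 0; let c1 := s.getD 2 0; let r2 := s.getD 3 0; let c2 := s.getD 4 0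
  let d := if s.getD 0 0 = 1 then -(s.getD 5 0) else s.getD 5 0
  (if i = r1 ∧ j = c1 then d else 0)
  + (if c2 + 1 < M ∧ i = r1 ∧ j = c2 + 1 then -d else 0)
  + (if r2 + 1 < N ∧ i = r2 + 1 ∧ j = c1 then -d else 0)
  + (if (c2 + 1 < M ∧ r2 + 1 < N) ∧ i = r2 + 1 ∧ j = c2 + 1 then d else 0)

theorem gg_upd2_shape {g : List (List Int)} {n m : Nat} (h : Shape g n m)
    (a b : Nat) (d : Int) (i j : Nat) :
    gg (pvUpd2 g a b d) i j = gg g i j + (if i = a ∧ j = b ∧ a < n ∧ b < m then d else 0) := by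
  rw [gg_upd2]
  congr 1
  by_cases ha : a < n
  · rw [h.1, h.2 a ha]
  · exact if_congr (iff_of_false (fun hc => ha (h.1 ▸ hc.2.2.1)) (fun hc => ha hc.2.2.1)) rfl rfl

theorem gg_ite_upd2 {g : List (List Int)} {n m : Nat} (h : Shape g n m) (P : Prop) [Decidable P]
    (a b : Nat) (d : Int) (i j : Nat) :
    gg (if P then pvUpd2 g a b d else g) i j =
      gg g i j + (if P ∧ i = a ∧ j = b ∧ a < n ∧ b < m then d else 0) := by
  by_cases hP : P
  · rw [if_pos hP, gg_upd2_shape h]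
    congr 1
    exact if_congr (Iff.intro (fun hc => ⟨hP, hc⟩) (fun hc => hc.2)) rfl rfl
  · rw [if_neg hP, if_neg (fun hc => hP hc.1), add_zero]

theorem shape_ite_upd2 {g : List (List Int)} {n m : Nat} (h : Shape g n m) (P : Prop) [Decidable P]
    (a b : Nat) (d : Int) : Shape (if P then pvUpd2 g a b d else g) n m := by
  split_ifs
  · exact shape_upd2 h a b d
  · exact h

theorem shape_mark {g : List (List Int)} {n m : Nat} (N M : Int) (h : Shape g n m) (s : List Int) :
    Shape (pvMark N M g s) n m := by
  unfold pvMark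
  split
  · dsimp only
    exact shape_ite_upd2 (shape_ite_upd2 (shape_ite_upd2 (shape_upd2 h ..) ..) ..) ..
  · exact h

theorem list6 {s : List Int} (h : s.length = 6) :
    ∃ a b c d e f : Int, s = [a, b, c, d, e, f] := by
  rcases s with _|⟨a,_|⟨b,_|⟨c,_|⟨d,_|⟨e,_|⟨f,_|⟨x,s⟩⟩⟩⟩⟩⟩⟩ <;>
    first | (exact ⟨a,b,c,d,e,f,rfl⟩) | simp at h

theorem gg_mark {g : List (List Int)} {n m : Nat} (h : Shape g n m)
    (s : List Int) (hs : SkillWF (↑n) (↑m) s) (i j : Nat) :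
    gg (pvMark (↑n) (↑m) g s) i j = gg g i j + mcell (↑n) (↑m) s (↑i) (↑j) := by
  obtain ⟨hlen, hwf⟩ := hs
  obtain ⟨t, r1, c1, r2, c2, deg0, rfl⟩ := list6 hlen
  simp only [List.getD, List.getElem?_cons_zero, List.getElem?_cons_succ, Option.getD_some] at hwf
  obtain ⟨h1, h2, h3, h4, h5, h6⟩ := hwf
  dsimp only [pvMark, mcell, List.getD, List.getElem?_cons_zero, List.getElem?_cons_succ,
    Option.getD_some]
  rw [gg_ite_upd2 (shape_ite_upd2 (shape_ite_upd2 (shape_upd2 h ..) ..) ..),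
      gg_ite_upd2 (shape_ite_upd2 (shape_upd2 h ..) ..),
      gg_ite_upd2 (shape_upd2 h ..), gg_upd2_shape h]
  have E1 : (i = r1.toNat ∧ j = c1.toNat ∧ r1.toNat < n ∧ c1.toNat < m) ↔
      ((i:Int) = r1 ∧ (j:Int) = c1) := by omega
  have E2 : ((c2 + 1 < (m:Int)) ∧ i = r1.toNat ∧ j = (c2+1).toNat ∧ r1.toNat < n ∧ (c2+1).toNat < m) ↔
      (c2 + 1 < (m:Int) ∧ (i:Int) = r1 ∧ (j:Int) = c2 + 1) := by omega
  have E3 : ((r2 + 1 < (n:Int)) ∧ i = (r2+1).toNat ∧ j = c1.toNat ∧ (r2+1).toNat < n ∧ c1.toNat < m) ↔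
      (r2 + 1 < (n:Int) ∧ (i:Int) = r2 + 1 ∧ (j:Int) = c1) := by omega
  have E4 : ((c2 + 1 < (m:Int) ∧ r2 + 1 < (n:Int)) ∧ i = (r2+1).toNat ∧ j = (c2+1).toNat ∧ (r2+1).toNat < n ∧ (c2+1).toNat < m) ↔
      ((c2 + 1 < (m:Int) ∧ r2 + 1 < (n:Int)) ∧ (i:Int) = r2 + 1 ∧ (j:Int) = c2 + 1) := by omega
  rw [if_congr E1 rfl rfl, if_congr E2 rfl rfl, if_congr E3 rfl rfl, if_congr E4 rfl rfl]
  simp only [add_assoc]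
  rfl

theorem shape_foldl_mark {n m : Nat} (N M : Int) (sk : List (List Int)) :
    ∀ g : List (List Int), Shape g n m → Shape (sk.foldl (pvMark N M) g) n m := by
  induction sk with
  | nil => exact fun g hg => hg
  | cons s sk ih => exact fun g hg => ih _ (shape_mark N M hg s)

theorem gg_foldl_mark {n m : Nat} (sk : List (List Int)) :
    ∀ g : List (List Int), Shape g n m → (∀ s ∈ sk, SkillWF (↑n) (↑m) s) → ∀ i j : Nat,
    gg (sk.foldl (pvMark (↑n) (↑m)) g) i j
      = gg g i j + ((sk.map (fun s => mcell (↑n) (↑m) s (↑i) (↑j))).sum) := by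
  induction sk with
  | nil => intro g _ _ i j; simp
  | cons s sk ih =>
      intro g hg hwf i j
      simp only [List.foldl_cons, List.map_cons, List.sum_cons]
      rw [ih _ (shape_mark _ _ hg s) (fun x hx => hwf x (List.mem_cons_of_mem _ hx)),
          gg_mark hg s (hwf s List.mem_cons_self)]
      ring

theorem shape_replicate (n m : Nat) : Shape (List.replicate n (List.replicate m (0:Int))) n m := by
  constructor
  · simp
  · intro i hi
    rw [List.getD, List.getElem?_replicate]
    simp [hi]

theorem gg_replicate (n m : Nat) (i j : Nat) : gg (List.replicate n (List.replicate m (0:Int))) i j = 0 := by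
  unfold gg
  simp [List.getD, List.getElem?_replicate]
  split_ifs <;> simp

def rstep (r : List Int) (j : Int) : List Int :=
  r.set j.toNat (r.getD j.toNat 0 + r.getD (j.toNat - 1) 0)

def pfx (r : List Int) (k : Nat) : Int := ∑ j' ∈ Finset.range k, r.getD j' 0

theorem foldl_set_row (l : List Int) (F : List Int → Int → List Int) :
    ∀ (g : List (List Int)) (i : Nat), i < g.length →
    l.foldl (fun g j => g.set i (F (g.getD i []) j)) g = g.set i (l.foldl F (g.getD i [])) := by
  induction l with
  | nil =>
      intro g i hi
      simp only [List.foldl_nil]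
      rw [List.getD, List.getElem?_eq_getElem hi]
      simp
  | cons x l ih =>
      intro g i hi
      simp only [List.foldl_cons]
      rw [ih (g.set i (F (g.getD i []) x)) i (by simp [hi]),
          getD_set_rows, if_pos ⟨rfl, hi⟩, List.set_set]

theorem rowfold_char (r : List Int) : ∀ k : Nat, k ≤ r.length →
    ((PySem.List.pyRange 1 (k:Int) 1).foldl rstep r).length = r.length ∧
    ∀ j : Nat, ((PySem.List.pyRange 1 (k:Int) 1).foldl rstep r).getD j 0
       = if j < k then pfx r (j+1) else r.getD j 0 := by
  intro k
  induction k with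
  | zero =>
      intro _
      rw [PySem.List.pyRange_one_eq_nil (by norm_num)]
      simp
  | succ k ih =>
      intro hk
      rcases Nat.eq_zero_or_pos k with hk0 | hkpos
      · subst hk0
        rw [show ((1:Nat):Int) = 1 by norm_num, PySem.List.pyRange_one_eq_nil (by norm_num)]
        refine ⟨rfl, fun j => ?_⟩
        split_ifs with hj
        · interval_cases j
          simp [pfx]
        · rfl
      · obtain ⟨hlen, hval⟩ := ih (by omega)
        rw [show (((k+1:Nat)):Int) = (k:Int) + 1 by push_cast; ring,
            PySem.List.pyRange_one_succ_right (by exact_mod_cast hkpos),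
            List.foldl_append]
        set r1 := (PySem.List.pyRange 1 (k:Int) 1).foldl rstep r with hr1
        simp only [List.foldl_cons, List.foldl_nil]
        have htn : ((k:Int)).toNat = k := Int.toNat_natCast k
        have htn1 : ((k:Int)).toNat - 1 = k - 1 := by omega
        constructor
        · rw [rstep, htn]; simp [hlen]
        · intro j
          rw [rstep, htn, getD_set]
          by_cases h1 : j = k ∧ k < r1.length
          · rw [if_pos h1]
            obtain ⟨hjk, _⟩ := h1; subst hjk
            rw [hval, if_neg (lt_irrefl j), hval, if_pos (by omega), if_pos (by omega)]
            have e : j - 1 + 1 = j := by omega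
            rw [e]
            simp only [pfx, Finset.sum_range_succ]
            ring
          · rw [if_neg h1]
            have hk1 : k < r1.length := by omega
            by_cases h2 : j < k + 1
            · have hne : j ≠ k := fun he => h1 ⟨he, hk1⟩
              rw [hval, if_pos (by omega), if_pos h2]
            · rw [hval, if_neg (by omega), if_neg h2]

theorem rowstep_eq (g : List (List Int)) (i j : Int) :
    pvRowStep g i j = g.set i.toNat (rstep (g.getD i.toNat []) j) := rfl

theorem rowpass_char {g : List (List Int)} {n m : Nat} (hg : Shape g n m) :
    ∀ k : Nat, k ≤ n →
    ((PySem.List.pyRange 0 (k:Int) 1).foldl (fun g i =>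
        (PySem.List.pyRange 1 (m:Int) 1).foldl (fun g j => pvRowStep g i j) g) g).length = n ∧
    ∀ a : Nat,
      ((PySem.List.pyRange 0 (k:Int) 1).foldl (fun g i =>
        (PySem.List.pyRange 1 (m:Int) 1).foldl (fun g j => pvRowStep g i j) g) g).getD a []
      = if a < k then (PySem.List.pyRange 1 (m:Int) 1).foldl rstep (g.getD a []) else g.getD a [] := by
  intro k
  induction k with
  | zero =>
      intro _
      rw [show PySem.List.pyRange 0 ((0:Nat):Int) 1 = [] from
            PySem.List.pyRange_one_eq_nil (by norm_num)]
      exact ⟨hg.1, fun a => by simp⟩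
  | succ k ih =>
      intro hk
      obtain ⟨hlen, hval⟩ := ih (by omega)
      rw [show (((k+1:Nat)):Int) = (k:Int) + 1 by push_cast; ring,
          show PySem.List.pyRange 0 ((k:Int) + 1) 1 = PySem.List.pyRange 0 (k:Int) 1 ++ [(k:Int)] from
            PySem.List.pyRange_one_succ_right (by positivity),
          List.foldl_append]
      set gk := (PySem.List.pyRange 0 (k:Int) 1).foldl (fun g i =>
        (PySem.List.pyRange 1 (m:Int) 1).foldl (fun g j => pvRowStep g i j) g) g with hgk
      simp only [List.foldl_cons, List.foldl_nil]
      have hkn : k < gk.length := by omega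
      have hfold : (PySem.List.pyRange 1 (m:Int) 1).foldl (fun g' j => pvRowStep g' (↑k) j) gk
          = gk.set k ((PySem.List.pyRange 1 (m:Int) 1).foldl rstep (gk.getD k [])) := by
        simp only [rowstep_eq, Int.toNat_natCast]
        exact foldl_set_row _ rstep gk k hkn
      rw [hfold]
      constructor
      · rw [List.length_set]; exact hlen
      · intro a
        rw [getD_set_rows]
        by_cases ha : a = k ∧ k < gk.length
        · obtain ⟨rfl, _⟩ := ha
          rw [if_pos ⟨rfl, by omega⟩, if_pos (by omega), hval, if_neg (lt_irrefl a)]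
        · rw [if_neg ha, hval]
          have hne : a ≠ k := fun he => ha ⟨he, hkn⟩
          by_cases h2 : a < k
          · rw [if_pos h2, if_pos (by omega)]
          · rw [if_neg h2, if_neg (by omega)]

def astep (p r : List Int) (j : Int) : List Int :=
  r.set j.toNat (r.getD j.toNat 0 + p.getD j.toNat 0)

theorem colstep_eq (g : List (List Int)) (i j : Int) :
    pvColStep g i j = g.set i.toNat (astep (g.getD (i.toNat - 1) []) (g.getD i.toNat []) j) := rfl

theorem addfold_char (p r : List Int) : ∀ k : Nat, k ≤ r.length →
    ((PySem.List.pyRange 0 (k:Int) 1).foldl (astep p) r).length = r.length ∧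
    ∀ j : Nat, ((PySem.List.pyRange 0 (k:Int) 1).foldl (astep p) r).getD j 0
      = if j < k then r.getD j 0 + p.getD j 0 else r.getD j 0 := by
  intro k
  induction k with
  | zero =>
      intro _
      rw [show PySem.List.pyRange 0 ((0:Nat):Int) 1 = [] from
            PySem.List.pyRange_one_eq_nil (by norm_num)]
      simp
  | succ k ih =>
      intro hk
      obtain ⟨hlen, hval⟩ := ih (by omega)
      rw [show (((k+1:Nat)):Int) = (k:Int) + 1 by push_cast; ring,
          show PySem.List.pyRange 0 ((k:Int) + 1) 1 = PySem.List.pyRange 0 (k:Int) 1 ++ [(k:Int)] from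
            PySem.List.pyRange_one_succ_right (by positivity),
          List.foldl_append]
      set rk := (PySem.List.pyRange 0 (k:Int) 1).foldl (astep p) r with hrk
      simp only [List.foldl_cons, List.foldl_nil]
      rw [astep, Int.toNat_natCast]
      constructor
      · rw [List.length_set]; exact hlen
      · intro j
        rw [getD_set]
        by_cases h1 : j = k ∧ k < rk.length
        · obtain ⟨rfl, _⟩ := h1
          rw [if_pos ⟨rfl, by omega⟩, hval, if_neg (lt_irrefl j), if_pos (by omega)]
        · rw [if_neg h1, hval]
          have hne : j ≠ k := fun he => h1 ⟨he, by omega⟩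
          by_cases h2 : j < k
          · rw [if_pos h2, if_pos (by omega)]
          · rw [if_neg h2, if_neg (by omega)]

theorem colInner (l : List Int) : ∀ (g : List (List Int)) (i : Nat), 1 ≤ i → i < g.length →
    l.foldl (fun g j => pvColStep g (↑i) j) g
      = g.set i (l.foldl (astep (g.getD (i-1) [])) (g.getD i [])) := by
  induction l with
  | nil =>
      intro g i _ hi
      simp only [List.foldl_nil]
      rw [List.getD, List.getElem?_eq_getElem hi]
      simp
  | cons x l ih =>
      intro g i h1 hi
      simp only [List.foldl_cons]
      rw [ih (pvColStep g (↑i) x) i h1 (by rw [colstep_eq]; simp [hi]),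
          colstep_eq, Int.toNat_natCast,
          getD_set_rows, if_neg (by rintro ⟨he, _⟩; omega),
          getD_set_rows, if_pos ⟨rfl, hi⟩, List.set_set]

theorem colpass_char {g : List (List Int)} {n m : Nat} (hg0 : Shape g n m) :
    ∀ k : Nat, 1 ≤ k → k ≤ n →
    (((PySem.List.pyRange 1 (k:Int) 1).foldl (fun g i =>
        (PySem.List.pyRange 0 (m:Int) 1).foldl (fun g j => pvColStep g i j) g) g)).length = n ∧
    (∀ a : Nat, a < n → (((PySem.List.pyRange 1 (k:Int) 1).foldl (fun g i =>
        (PySem.List.pyRange 0 (m:Int) 1).foldl (fun g j => pvColStep g i j) g) g).getD a []).length = m) ∧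
    ∀ a j : Nat, a < n →
      gg ((PySem.List.pyRange 1 (k:Int) 1).foldl (fun g i =>
        (PySem.List.pyRange 0 (m:Int) 1).foldl (fun g j => pvColStep g i j) g) g) a j
      = if a < k ∧ j < m then (∑ i' ∈ Finset.range (a+1), gg g i' j) else gg g a j := by
  intro k
  induction k with
  | zero => omega
  | succ k ih =>
      intro _ hk
      rcases Nat.eq_zero_or_pos k with hk0 | hkpos
      · subst hk0
        rw [show (((1:Nat)):Int) = 1 by norm_num,
            show PySem.List.pyRange 1 (1:Int) 1 = [] from
              PySem.List.pyRange_one_eq_nil (by norm_num)]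
        refine ⟨hg0.1, fun a ha => hg0.2 a ha, fun a j ha => ?_⟩
        simp only [List.foldl_nil]
        by_cases hc : a < 1 ∧ j < m
        · obtain ⟨ha1, hj⟩ := hc
          interval_cases a
          rw [if_pos ⟨by omega, hj⟩]
          simp
        · rw [if_neg hc]
      · obtain ⟨hlen, hrow, hval⟩ := ih (by omega) (by omega)
        rw [show (((k+1:Nat)):Int) = (k:Int) + 1 by push_cast; ring,
            show PySem.List.pyRange 1 ((k:Int) + 1) 1 = PySem.List.pyRange 1 (k:Int) 1 ++ [(k:Int)] from
              PySem.List.pyRange_one_succ_right (by exact_mod_cast hkpos),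
            List.foldl_append]
        set gk := (PySem.List.pyRange 1 (k:Int) 1).foldl (fun g i =>
          (PySem.List.pyRange 0 (m:Int) 1).foldl (fun g j => pvColStep g i j) g) g with hgk
        simp only [List.foldl_cons, List.foldl_nil]
        have hkn : k < gk.length := by omega
        rw [colInner _ gk k hkpos hkn]
        have hrlen : m ≤ (gk.getD k []).length := by rw [hrow k (by omega)]
        obtain ⟨alen, aval⟩ := addfold_char (gk.getD (k-1) []) (gk.getD k []) m hrlen
        constructor
        · rw [List.length_set]; exact hlen
        constructor
        · intro a ha
          rw [getD_set_rows]
          by_cases hc : a = k ∧ k < gk.length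
          · rw [if_pos hc, alen]; exact hrow k (by omega)
          · rw [if_neg hc]; exact hrow a ha
        · intro a j ha
          unfold gg
          rw [getD_set_rows]
          by_cases hc : a = k ∧ k < gk.length
          · obtain ⟨rfl, _⟩ := hc
            rw [if_pos ⟨rfl, hkn⟩, aval]
            by_cases hj : j < m
            · rw [if_pos hj, if_pos ⟨by omega, hj⟩]
              have e1 : gg gk a j = gg g a j := by
                rw [hval a j ha, if_neg (by omega)]
              have e2 : gg gk (a-1) j = ∑ i' ∈ Finset.range a, gg g i' j := by
                rw [hval (a-1) j (by omega), if_pos ⟨by omega, hj⟩,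
                    show a - 1 + 1 = a by omega]
              unfold gg at e1 e2
              rw [e1, e2, Finset.sum_range_succ]
              ring
            · rw [if_neg hj, if_neg (fun hcc => hj hcc.2)]
              have := hval a j ha
              unfold gg at this
              rw [this, if_neg (by omega)]
          · rw [if_neg hc]
            have hne : a ≠ k := fun he => hc ⟨he, hkn⟩
            have := hval a j ha
            unfold gg at this
            rw [this]
            exact if_congr (Iff.intro (fun ⟨u, v⟩ => ⟨by omega, v⟩)
              (fun ⟨u, v⟩ => ⟨by omega, v⟩)) rfl rfl

def ShapeGE (g : List (List Int)) (n m : Nat) : Prop :=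
  g.length = n ∧ ∀ i < n, m ≤ (g.getD i []).length

theorem shapeGE_upd2 {g : List (List Int)} {n m : Nat} (h : ShapeGE g n m) (a b : Nat) (d : Int) :
    ShapeGE (pvUpd2 g a b d) n m :=
  ⟨by rw [len_upd2]; exact h.1, fun i hi => by rw [rowlen_upd2]; exact h.2 i hi⟩

theorem gg_upd2_inb {g : List (List Int)} (a b : Nat) (ha : a < g.length)
    (hb : b < (g.getD a []).length) (d : Int) (i j : Nat) :
    gg (pvUpd2 g a b d) i j = gg g i j + (if i = a ∧ j = b then d else 0) := by
  rw [gg_upd2]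
  congr 1
  exact if_congr (Iff.intro (fun hc => ⟨hc.1, hc.2.1⟩) (fun hc => ⟨hc.1, hc.2, ha, hb⟩)) rfl rfl

theorem rect_cols {b : List (List Int)} {n m : Nat} (hbs : ShapeGE b n m)
    (ii : Nat) (hii : ii < n) (d c1 : Int) (hc1 : 0 ≤ c1) :
    ∀ k : Nat, c1 + k ≤ m →
    ShapeGE ((PySem.List.pyRange c1 (c1 + (k:Int)) 1).foldl
      (fun b j => pvUpd2 b ii j.toNat d) b) n m ∧
    ∀ a j : Nat, gg ((PySem.List.pyRange c1 (c1 + (k:Int)) 1).foldl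
      (fun b j => pvUpd2 b ii j.toNat d) b) a j
      = gg b a j + (if a = ii ∧ c1 ≤ (j:Int) ∧ (j:Int) < c1 + k then d else 0) := by
  intro k
  induction k with
  | zero =>
      intro _
      rw [show c1 + ((0:Nat):Int) = c1 by push_cast; ring,
          PySem.List.pyRange_one_eq_nil (le_refl c1)]
      exact ⟨hbs, fun a j => by
        simp only [List.foldl_nil]
        rw [if_neg (by rintro ⟨_, h1, h2⟩; omega), add_zero]⟩
  | succ k ih =>
      intro hk
      obtain ⟨ihs, ihv⟩ := ih (by push_cast at hk ⊢; omega)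
      rw [show c1 + ((k+1:Nat):Int) = (c1 + (k:Int)) + 1 by push_cast; ring,
          show PySem.List.pyRange c1 ((c1 + (k:Int)) + 1) 1
              = PySem.List.pyRange c1 (c1 + (k:Int)) 1 ++ [c1 + (k:Int)] from
            PySem.List.pyRange_one_succ_right (by omega),
          List.foldl_append]
      set bk := (PySem.List.pyRange c1 (c1 + (k:Int)) 1).foldl (fun b j => pvUpd2 b ii j.toNat d) b
      simp only [List.foldl_cons, List.foldl_nil]
      have hin : ii < bk.length := by rw [ihs.1]; exact hii
      have hjn : (c1 + (k:Int)).toNat < (bk.getD ii []).length := by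
        have := ihs.2 ii hii; omega
      constructor
      · exact shapeGE_upd2 ihs _ _ d
      · intro a j
        rw [gg_upd2_inb _ _ hin hjn, ihv]
        have e : (a = ii ∧ j = (c1 + (k:Int)).toNat)
            ↔ (a = ii ∧ (j:Int) = c1 + (k:Int)) := by constructor <;>
              (rintro ⟨rfl, hj⟩; exact ⟨rfl, by omega⟩)
        rw [if_congr e rfl rfl]
        split_ifs <;> first | (exfalso; omega) | ring

theorem rect_rows {b : List (List Int)} {n m : Nat} (hbs : ShapeGE b n m)
    (d r1 c1 : Int) (h0r : 0 ≤ r1) (h0c : 0 ≤ c1) (kc : Nat) (hkc : c1 + kc ≤ m) :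
    ∀ kr : Nat, r1 + kr ≤ n →
    ShapeGE ((PySem.List.pyRange r1 (r1 + (kr:Int)) 1).foldl (fun b i =>
      (PySem.List.pyRange c1 (c1 + (kc:Int)) 1).foldl (fun b j => pvUpd2 b i.toNat j.toNat d) b) b) n m ∧
    ∀ a j : Nat, gg ((PySem.List.pyRange r1 (r1 + (kr:Int)) 1).foldl (fun b i =>
      (PySem.List.pyRange c1 (c1 + (kc:Int)) 1).foldl (fun b j => pvUpd2 b i.toNat j.toNat d) b) b) a j
      = gg b a j + (if (r1 ≤ (a:Int) ∧ (a:Int) < r1 + kr) ∧ c1 ≤ (j:Int) ∧ (j:Int) < c1 + kc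
                    then d else 0) := by
  intro kr
  induction kr with
  | zero =>
      intro _
      rw [show r1 + ((0:Nat):Int) = r1 by push_cast; ring,
          PySem.List.pyRange_one_eq_nil (le_refl r1)]
      exact ⟨hbs, fun a j => by
        simp only [List.foldl_nil]
        rw [if_neg (by rintro ⟨⟨h1, h2⟩, _⟩; omega), add_zero]⟩
  | succ kr ih =>
      intro hk
      obtain ⟨ihs, ihv⟩ := ih (by push_cast at hk ⊢; omega)
      rw [show r1 + ((kr+1:Nat):Int) = (r1 + (kr:Int)) + 1 by push_cast; ring,
          show PySem.List.pyRange r1 ((r1 + (kr:Int)) + 1) 1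
              = PySem.List.pyRange r1 (r1 + (kr:Int)) 1 ++ [r1 + (kr:Int)] from
            PySem.List.pyRange_one_succ_right (by omega),
          List.foldl_append]
      set bk := (PySem.List.pyRange r1 (r1 + (kr:Int)) 1).foldl (fun b i =>
        (PySem.List.pyRange c1 (c1 + (kc:Int)) 1).foldl (fun b j => pvUpd2 b i.toNat j.toNat d) b) b
      simp only [List.foldl_cons, List.foldl_nil]
      have hii : (r1 + (kr:Int)).toNat < n := by omega
      obtain ⟨cs, cv⟩ := rect_cols ihs (r1 + (kr:Int)).toNat hii d c1 h0c kc hkc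
      constructor
      · exact cs
      · intro a j
        rw [cv, ihv]
        have e : (a = (r1 + (kr:Int)).toNat ∧ c1 ≤ (j:Int) ∧ (j:Int) < c1 + kc)
            ↔ ((a:Int) = r1 + kr ∧ c1 ≤ (j:Int) ∧ (j:Int) < c1 + kc) := by
          constructor <;> (rintro ⟨h1, h2⟩; exact ⟨by omega, h2⟩)
        rw [if_congr e rfl rfl]
        split_ifs <;> first | (exfalso; omega) | ring

def cover (s : List Int) (i j : Int) : Int :=
  if s.getD 1 0 ≤ i ∧ i ≤ s.getD 3 0 ∧ s.getD 2 0 ≤ j ∧ j ≤ s.getD 4 0 then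
    (if s.getD 0 0 = 1 then -(s.getD 5 0) else s.getD 5 0) else 0

theorem gg_apply {bd : List (List Int)} {n m : Nat} (hbs : ShapeGE bd n m)
    (s : List Int) (hs : SkillWF (↑n) (↑m) s) :
    ShapeGE (pvApply bd s) n m ∧
    ∀ a j : Nat, gg (pvApply bd s) a j = gg bd a j + cover s (↑a) (↑j) := by
  obtain ⟨hlen, hwf⟩ := hs
  obtain ⟨t, r1, c1, r2, c2, deg0, rfl⟩ := list6 hlen
  simp only [List.getD, List.getElem?_cons_zero, List.getElem?_cons_succ, Option.getD_some] at hwf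
  obtain ⟨h1, h2, h3, h4, h5, h6⟩ := hwf
  dsimp only [pvApply, cover, List.getD, List.getElem?_cons_zero, List.getElem?_cons_succ,
    Option.getD_some]
  rw [show (r2 + 1 : Int) = r1 + (((r2 + 1 - r1).toNat : Nat) : Int) by omega,
      show (c2 + 1 : Int) = c1 + (((c2 + 1 - c1).toNat : Nat) : Int) by omega]
  obtain ⟨rs, rv⟩ := rect_rows hbs (if t = 1 then -deg0 else deg0) r1 c1 h1 h4
    (c2 + 1 - c1).toNat (by omega) (r2 + 1 - r1).toNat (by omega)
  refine ⟨rs, fun a j => ?_⟩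
  rw [rv]
  have e : ((r1 ≤ (a:Int) ∧ (a:Int) < r1 + ((r2 + 1 - r1).toNat : Int)) ∧
        c1 ≤ (j:Int) ∧ (j:Int) < c1 + ((c2 + 1 - c1).toNat : Int))
      ↔ (r1 ≤ (a:Int) ∧ (a:Int) ≤ r2 ∧ c1 ≤ (j:Int) ∧ (j:Int) ≤ c2) := by
    constructor
    · rintro ⟨⟨u1, u2⟩, u3, u4⟩; exact ⟨u1, by omega, u3, by omega⟩
    · rintro ⟨u1, u2, u3, u4⟩; exact ⟨⟨u1, by omega⟩, u3, by omega⟩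
  rw [if_congr e rfl rfl]
  rfl

theorem gg_apply_foldl {n m : Nat} (sk : List (List Int)) :
    ∀ bd : List (List Int), ShapeGE bd n m → (∀ s ∈ sk, SkillWF (↑n) (↑m) s) →
    ShapeGE (sk.foldl pvApply bd) n m ∧
    ∀ a j : Nat, gg (sk.foldl pvApply bd) a j
      = gg bd a j + ((sk.map (fun s => cover s (↑a) (↑j))).sum) := by
  induction sk with
  | nil => intro bd hbs _; exact ⟨hbs, fun a j => by simp⟩
  | cons s sk ih =>
      intro bd hbs hwf
      simp only [List.foldl_cons, List.map_cons, List.sum_cons]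
      obtain ⟨s1, v1⟩ := gg_apply hbs s (hwf s List.mem_cons_self)
      obtain ⟨s2, v2⟩ := ih _ s1 (fun x hx => hwf x (List.mem_cons_of_mem _ hx))
      refine ⟨s2, fun a j => ?_⟩
      rw [v2, v1]
      ring

theorem sum_ind (v b : Int) (hb : 0 ≤ b) (j : Nat) :
    ∑ j' ∈ Finset.range (j+1), (if (j':Int) = b then v else 0) = if b ≤ (j:Int) then v else 0 := by
  have e : ∀ j' : ℕ, ((j':Int) = b) = (j' = b.toNat) := fun j' => propext (by omega)
  simp_rw [e]
  rw [Finset.sum_ite_eq' (Finset.range (j+1)) b.toNat (fun _ => v)]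
  exact if_congr (by simp only [Finset.mem_range]; omega) rfl rfl

theorem sum_ind_cond (P : Prop) [Decidable P] (v b : Int) (hb : 0 ≤ b) (j : Nat) :
    ∑ j' ∈ Finset.range (j+1), (if P ∧ (j':Int) = b then v else 0)
      = if P ∧ b ≤ (j:Int) then v else 0 := by
  by_cases hP : P
  · simp only [hP, true_and]; exact sum_ind v b hb j
  · rw [if_neg (fun hc => hP hc.1),
        Finset.sum_congr rfl (fun j' _ => if_neg (fun hc => hP hc.1))]
    simp

theorem box_ind (P : Prop) [Decidable P] (a b v : Int) (ha : 0 ≤ a) (hb : 0 ≤ b) (i j : Nat) :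
    ∑ i' ∈ Finset.range (i+1), ∑ j' ∈ Finset.range (j+1),
        (if P ∧ (i':Int) = a ∧ (j':Int) = b then v else 0)
      = if P ∧ a ≤ (i:Int) ∧ b ≤ (j:Int) then v else 0 := by
  have inner : ∀ i' : ℕ, ∑ j' ∈ Finset.range (j+1),
      (if P ∧ (i':Int) = a ∧ (j':Int) = b then v else 0)
      = if (P ∧ (i':Int) = a) ∧ b ≤ (j:Int) then v else 0 := by
    intro i'
    rw [← sum_ind_cond (P ∧ (i':Int) = a) v b hb j]
    exact Finset.sum_congr rfl (fun j' _ => if_congr (by tauto) rfl rfl)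
  rw [Finset.sum_congr rfl (fun i' _ => inner i'),
      Finset.sum_congr rfl (fun i' _ => if_congr (Iff.intro
        (fun hc => And.intro (And.intro hc.1.1 hc.2) hc.1.2)
        (fun hc => And.intro (And.intro hc.1.1 hc.2) hc.1.2)) rfl rfl)]
  · rw [sum_ind_cond (P ∧ b ≤ (j:Int)) v a ha i]
    exact if_congr (by tauto) rfl rfl

theorem finsum_listsum (F : Finset ℕ) (l : List (List Int)) (f : ℕ → List Int → Int) :
    ∑ x ∈ F, (l.map (f x)).sum = (l.map (fun s => ∑ x ∈ F, f x s)).sum := by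
  induction l with
  | nil => simp
  | cons s l ih => simp [List.map_cons, List.sum_cons, Finset.sum_add_distrib, ih]

theorem box_ind0 (a b v : Int) (ha : 0 ≤ a) (hb : 0 ≤ b) (i j : Nat) :
    ∑ i' ∈ Finset.range (i+1), ∑ j' ∈ Finset.range (j+1),
        (if (i':Int) = a ∧ (j':Int) = b then v else 0)
      = if a ≤ (i:Int) ∧ b ≤ (j:Int) then v else 0 := by
  have inner : ∀ i' : ℕ, ∑ j' ∈ Finset.range (j+1),
      (if (i':Int) = a ∧ (j':Int) = b then v else 0)
      = if ((i':Int) = a) ∧ b ≤ (j:Int) then v else 0 :=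
    fun i' => sum_ind_cond ((i':Int) = a) v b hb j
  rw [Finset.sum_congr rfl (fun i' _ => inner i'),
      Finset.sum_congr rfl (fun i' _ => if_congr (Iff.intro
        (fun hc => And.intro hc.2 hc.1) (fun hc => And.intro hc.2 hc.1)) rfl rfl),
      sum_ind_cond (b ≤ (j:Int)) v a ha i]
  exact if_congr (by tauto) rfl rfl

theorem box_mcell {n m : Nat} (s : List Int) (hs : SkillWF (↑n) (↑m) s)
    (i j : Nat) (hi : i < n) (hj : j < m) :
    ∑ i' ∈ Finset.range (i+1), ∑ j' ∈ Finset.range (j+1), mcell (↑n) (↑m) s (↑i') (↑j')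
      = cover s (↑i) (↑j) := by
  obtain ⟨hlen, hwf⟩ := hs
  obtain ⟨t, r1, c1, r2, c2, deg0, rfl⟩ := list6 hlen
  simp only [List.getD, List.getElem?_cons_zero, List.getElem?_cons_succ, Option.getD_some] at hwf
  obtain ⟨h1, h2, h3, h4, h5, h6⟩ := hwf
  simp only [mcell, cover, List.getD_cons_zero, List.getD_cons_succ]
  simp only [Finset.sum_add_distrib]
  rw [box_ind0 r1 c1 (if t = 1 then -deg0 else deg0) h1 h4 i j,
      box_ind (c2+1 < (m:Int)) r1 (c2+1) _ h1 (by omega) i j,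
      box_ind (r2+1 < (n:Int)) (r2+1) c1 _ (by omega) h4 i j,
      box_ind (c2+1 < (m:Int) ∧ r2+1 < (n:Int)) (r2+1) (c2+1) _ (by omega) (by omega) i j]
  split_ifs <;> first | (exfalso; omega) | ring

theorem cell_key (board skill : List (List Int))
    (hne : board ≠ []) (hrows : ∀ row ∈ board, (board.headD []).length ≤ row.length)
    (hwfs : ∀ s ∈ skill, SkillWF (↑board.length) (↑(board.headD []).length) s)
    (it jt : Nat) (hit : it < board.length) (hjt : jt < (board.headD []).length) :
    (board.getD it []).getD jt 0
      + gg (pvColPass (↑board.length) (↑(board.headD []).length)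
           (pvRowPass (↑board.length) (↑(board.headD []).length)
             (skill.foldl (pvMark (↑board.length) (↑(board.headD []).length))
               (List.replicate board.length (List.replicate (board.headD []).length 0))))) it jt
      = gg (skill.foldl pvApply board) it jt := by
  set n := board.length with hn'
  set m := (board.headD []).length with hm'
  have hn : 1 ≤ n := List.length_pos_of_ne_nil hne
  set T := skill.foldl (pvMark (↑n) (↑m)) (List.replicate n (List.replicate m 0)) with hT'
  have hsT : Shape T n m := shape_foldl_mark (↑n) (↑m) skill _ (shape_replicate n m)
  have hTv : ∀ i j : Nat, gg T i j = ((skill.map (fun s => mcell (↑n) (↑m) s (↑i) (↑j))).sum) := by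
    intro i j
    rw [hT', gg_foldl_mark skill _ (shape_replicate n m) hwfs i j, gg_replicate, zero_add]
  -- row pass
  obtain ⟨l1, v1⟩ := rowpass_char hsT n (le_refl n)
  set t1 := pvRowPass (↑n) (↑m) T with ht1'
  have ht1 : t1 = (PySem.List.pyRange 0 (n:Int) 1).foldl (fun g i =>
      (PySem.List.pyRange 1 (m:Int) 1).foldl (fun g j => pvRowStep g i j) g) T := rfl
  have l1' : t1.length = n := by rw [ht1]; exact l1
  have hrowlen : ∀ a : Nat, a < n → (T.getD a []).length = m := hsT.2
  have v1' : ∀ a : Nat, a < n →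
      t1.getD a [] = (PySem.List.pyRange 1 (m:Int) 1).foldl rstep (T.getD a []) := by
    intro a ha
    rw [ht1, v1 a, if_pos ha]
  have hst1 : Shape t1 n m := by
    refine ⟨l1', fun a ha => ?_⟩
    rw [v1' a ha, (rowfold_char (T.getD a []) m (le_of_eq (hrowlen a ha).symm)).1,
        hrowlen a ha]
  have gt1 : ∀ a j : Nat, a < n → j < m →
      gg t1 a j = ∑ j' ∈ Finset.range (j+1), gg T a j' := by
    intro a j ha hj
    unfold gg
    rw [v1' a ha, (rowfold_char (T.getD a []) m (le_of_eq (hrowlen a ha).symm)).2 j,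
        if_pos hj]
    rfl
  -- col pass
  obtain ⟨l2, r2c, v2⟩ := colpass_char hst1 n hn (le_refl n)
  have gt2 : gg (pvColPass (↑n) (↑m) t1) it jt
      = ∑ i' ∈ Finset.range (it+1), gg t1 i' jt := by
    have : pvColPass (↑n) (↑m) t1 = (PySem.List.pyRange 1 (n:Int) 1).foldl (fun g i =>
        (PySem.List.pyRange 0 (m:Int) 1).foldl (fun g j => pvColStep g i j) g) t1 := rfl
    rw [this, v2 it jt hit, if_pos ⟨hit, hjt⟩]
  rw [gt2]
  have sum1 : ∑ i' ∈ Finset.range (it+1), gg t1 i' jt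
      = (skill.map (fun s => cover s (↑it) (↑jt))).sum := by
    have st1 : ∑ i' ∈ Finset.range (it+1), gg t1 i' jt
        = ∑ i' ∈ Finset.range (it+1), ∑ j' ∈ Finset.range (jt+1), gg T i' j' :=
      Finset.sum_congr rfl (fun i' hi' => gt1 i' jt (by
        have := Finset.mem_range.mp hi'; omega) hjt)
    have st2 : ∑ i' ∈ Finset.range (it+1), ∑ j' ∈ Finset.range (jt+1), gg T i' j'
        = ∑ i' ∈ Finset.range (it+1), ∑ j' ∈ Finset.range (jt+1),
            ((skill.map (fun s => mcell (↑n) (↑m) s (↑i') (↑j'))).sum) :=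
      Finset.sum_congr rfl (fun i' _ => Finset.sum_congr rfl (fun j' _ => hTv i' j'))
    have st3 : ∑ i' ∈ Finset.range (it+1), ∑ j' ∈ Finset.range (jt+1),
            ((skill.map (fun s => mcell (↑n) (↑m) s (↑i') (↑j'))).sum)
        = ∑ i' ∈ Finset.range (it+1),
            ((skill.map (fun s => ∑ j' ∈ Finset.range (jt+1), mcell (↑n) (↑m) s (↑i') (↑j'))).sum) :=
      Finset.sum_congr rfl (fun i' _ => finsum_listsum (Finset.range (jt+1)) skill
        (fun j' s => mcell (↑n) (↑m) s (↑i') (↑j')))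
    have st4 : ∑ i' ∈ Finset.range (it+1),
            ((skill.map (fun s => ∑ j' ∈ Finset.range (jt+1), mcell (↑n) (↑m) s (↑i') (↑j'))).sum)
        = (skill.map (fun s => ∑ i' ∈ Finset.range (it+1),
            ∑ j' ∈ Finset.range (jt+1), mcell (↑n) (↑m) s (↑i') (↑j'))).sum :=
      finsum_listsum (Finset.range (it+1)) skill
        (fun i' s => ∑ j' ∈ Finset.range (jt+1), mcell (↑n) (↑m) s (↑i') (↑j'))
    have st5 : (skill.map (fun s => ∑ i' ∈ Finset.range (it+1),
            ∑ j' ∈ Finset.range (jt+1), mcell (↑n) (↑m) s (↑i') (↑j'))).sum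
        = (skill.map (fun s => cover s (↑it) (↑jt))).sum :=
      congrArg List.sum (List.map_congr_left (fun s hs =>
        box_mcell s (hwfs s hs) it jt hit hjt))
    rw [st1, st2, st3, st4, st5]
  rw [sum1]
  -- B side
  have hbs : ShapeGE board n m := by
    refine ⟨rfl, fun a ha => ?_⟩
    have : board.getD a [] ∈ board := by
      rw [List.getD, List.getElem?_eq_getElem ha]
      exact List.getElem_mem ha
    exact hrows _ this
  obtain ⟨_, vB⟩ := gg_apply_foldl skill board hbs hwfs
  rw [vB it jt]
  rfl

theorem count_congr (n m : Nat) (f g : Nat → Nat → Int)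
    (h : ∀ i < n, ∀ j < m, f i j = g i j) :
    (PySem.List.pyRange 0 (n:Int) 1).foldl (fun a i =>
      (PySem.List.pyRange 0 (m:Int) 1).foldl (fun a j =>
        a + (if 0 < f i.toNat j.toNat then (1:Int) else 0)) a) 0
    = (PySem.List.pyRange 0 (n:Int) 1).foldl (fun a i =>
      (PySem.List.pyRange 0 (m:Int) 1).foldl (fun a j =>
        a + (if 0 < g i.toNat j.toNat then (1:Int) else 0)) a) 0 := by
  apply PySem.List.foldl_congr_mem
  intro acc i hi
  apply PySem.List.foldl_congr_mem
  intro acc' j hj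
  obtain ⟨hi0, hi1⟩ := PySem.List.mem_pyRange_one.mp hi
  obtain ⟨hj0, hj1⟩ := PySem.List.mem_pyRange_one.mp hj
  rw [h i.toNat (by omega) j.toNat (by omega)]

-- ===== VERDICT (by name: the statement is the Claim_ definition above) =====
theorem solution_spec : Claim_equal_solution := by
  unfold Claim_equal_solution
  intro board skill _ hpre
  unfold Spec_solution
  obtain ⟨hne, hrows, hwfs⟩ := hpre
  show solution board skill = solution_alt board skill
  unfold solution solution_alt
  exact count_congr board.length (board.headD []).length
    (fun it jt => (board.getD it []).getD jt 0
      + gg (pvColPass (↑board.length) (↑(board.headD []).length)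
           (pvRowPass (↑board.length) (↑(board.headD []).length)
             (skill.foldl (pvMark (↑board.length) (↑(board.headD []).length))
               (List.replicate board.length (List.replicate (board.headD []).length 0))))) it jt)
    (fun it jt => gg (skill.foldl pvApply board) it jt)
    (fun it hit jt hjt => cell_key board skill hne hrows hwfs it jt hit hjt)
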